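-- pv_equiv track=rewrite | github.com/ekinda/corgi-reproduction | code/imputation_eval_regions_avocado.py | select_nonoverlapping
-- ===== SOURCE A (Python) =====
-- def select_nonoverlapping(regions):
--     by_chr = {"chr1": [], "chr10": []}
--     for chrom, start, end, idx in regions:
--         if chrom in by_chr:
--             by_chr[chrom].append((chrom, start, end, idx))
--     selected = []
--     for chrom in ("chr1", "chr10"):
--         cur = sorted(by_chr[chrom], key=lambda x: (x[1], x[2]))
--         last_end = None
--         for item in cur:
--             _, start, end, _ = item
--             if last_end is None or start >= last_end:
--                 selected.append(item)
--                 last_end = end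
--     return selected
-- ===== SOURCE B (Python) =====
-- def select_nonoverlapping(regions):
--     selected = []
--     for chrom in ("chr1", "chr10"):
--         pool = [r for r in regions if r[0] == chrom]
--         last_end = None
--         while pool:
--             best = min(pool, key=lambda r: (r[1], r[2]))
--             pool.remove(best)
--             if last_end is None or best[1] >= last_end:
--                 selected.append(best)
--                 last_end = best[2]
--     return selected
-- ===== Notes on version B (the rewrite author's own statement) =====
-- stated objective: alternative
-- what changed: Replaces dict-bucketing plus a library sort followed by a separate greedy pass with a selection-based loop: repeatedly extract the (start,end)-minimal region from the per-chromosome pool with min()+remove() and accept or discard it on the spot, so no sorted list is ever built and the greedy test is fused into the extraction.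
import Mathlib
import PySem

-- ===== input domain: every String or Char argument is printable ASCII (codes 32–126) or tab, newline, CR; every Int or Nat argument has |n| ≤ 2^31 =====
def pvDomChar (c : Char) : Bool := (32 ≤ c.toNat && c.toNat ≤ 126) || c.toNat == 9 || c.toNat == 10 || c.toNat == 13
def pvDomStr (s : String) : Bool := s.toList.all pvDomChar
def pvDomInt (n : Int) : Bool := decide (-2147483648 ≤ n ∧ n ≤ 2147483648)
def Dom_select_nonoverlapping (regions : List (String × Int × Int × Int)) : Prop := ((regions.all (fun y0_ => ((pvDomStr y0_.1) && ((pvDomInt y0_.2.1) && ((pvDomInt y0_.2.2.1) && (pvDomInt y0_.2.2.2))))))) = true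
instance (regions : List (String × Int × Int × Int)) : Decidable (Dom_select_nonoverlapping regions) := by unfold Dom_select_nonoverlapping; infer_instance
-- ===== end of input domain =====

-- B replaces dict-bucketing + per-chromosome sort + separate greedy pass with a selection
-- loop that repeatedly extracts the (start,end)-minimal region from the pool and accepts
-- or discards it on the spot (alternative algorithm: no sorted list is ever built).

-- ===== PORT A =====
-- greedy inner loop of A ('for item in cur: …'), state = (selected, last_end)
def pvGreedyStep (st : List (String × Int × Int × Int) × Option Int)
    (item : String × Int × Int × Int) : List (String × Int × Int × Int) × Option Int :=
  match st.2 with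
  | none => (st.1 ++ [item], some item.2.2.1)
  | some le => if item.2.1 ≥ le then (st.1 ++ [item], some item.2.2.1) else st

def select_nonoverlapping (regions : List (String × Int × Int × Int)) :
    List (String × Int × Int × Int) :=
  let by_chr : PySem.Dict String (List (String × Int × Int × Int)) :=
    (PySem.Dict.empty.insert "chr1" []).insert "chr10" []
  let by_chr := regions.foldl
    (fun d r => if d.contains r.1 then d.modify r.1 [] (fun l => l ++ [r]) else d) by_chr
  (["chr1", "chr10"]).foldl
    (fun sel chrom =>
      let cur := PySem.List.sorted2 (by_chr.getD chrom []) (fun x => x.2.1) (fun x => x.2.2.1)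
      (cur.foldl pvGreedyStep (sel, none)).1) []

-- ===== PORT B =====
-- '(r[1], r[2]) < (m[1], m[2])' on tuples, the comparison min() performs in Source B
def pvBef (a b : String × Int × Int × Int) : Bool :=
  decide (a.2.1 < b.2.1) || (!decide (b.2.1 < a.2.1) && decide (a.2.2.1 < b.2.2.1))

-- the fold min() performs (used below to state facts about PySem.List.min2?)
def pvMinStep (acc : Option (String × Int × Int × Int)) (x : String × Int × Int × Int) :
    Option (String × Int × Int × Int) :=
  match acc with
  | none => some x
  | some m => if pvBef x m then some x else some m

-- the next three lemmas are cited by pvExtract's decreasing_by (termination of the while loop)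
theorem pv_min2?_eq_fold (xs : List (String × Int × Int × Int)) :
    PySem.List.min2? xs (fun r => r.2.1) (fun r => r.2.2.1) = xs.foldl pvMinStep none := by
  unfold PySem.List.min2?
  congr 1
  funext acc x
  cases acc <;> rfl

theorem pv_minfold_mem :
    ∀ (t : List (String × Int × Int × Int)) (b : String × Int × Int × Int),
    ∃ m, t.foldl pvMinStep (some b) = some m ∧ (m = b ∨ m ∈ t) := by
  intro t
  induction t with
  | nil => intro b; exact ⟨b, rfl, Or.inl rfl⟩
  | cons x s ih =>
    intro b
    simp only [List.foldl_cons]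
    by_cases h : pvBef x b
    · obtain ⟨m, hm, hmem⟩ := ih x
      refine ⟨m, by simpa [pvMinStep, h] using hm, ?_⟩
      rcases hmem with rfl | hm'
      · simp
      · simp [hm']
    · obtain ⟨m, hm, hmem⟩ := ih b
      refine ⟨m, by simpa [pvMinStep, h] using hm, ?_⟩
      rcases hmem with rfl | hm'
      · simp
      · simp [hm']

theorem pv_pool_len (x : String × Int × Int × Int) (t : List (String × Int × Int × Int)) :
    ((PySem.List.remove? (x :: t)
        ((PySem.List.min2? (x :: t) (fun r => r.2.1) (fun r => r.2.2.1)).getD x)).getD (x :: t)).length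
      < (x :: t).length := by
  have hfold : PySem.List.min2? (x :: t) (fun r => r.2.1) (fun r => r.2.2.1)
      = t.foldl pvMinStep (some x) := by
    rw [pv_min2?_eq_fold]; rfl
  obtain ⟨m, hm, hmem⟩ := pv_minfold_mem t x
  have hmem' : m ∈ x :: t := by
    rcases hmem with rfl | h
    · simp
    · simp [h]
  have hbest : (PySem.List.min2? (x :: t) (fun r => r.2.1) (fun r => r.2.2.1)).getD x = m := by
    rw [hfold, hm]; rfl
  rw [hbest]
  obtain ⟨i, hi⟩ := Option.isSome_iff_exists.mp (List.isSome_idxOf?.mpr hmem')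
  have hilt : i < (x :: t).length := (List.idxOf?_eq_some_iff.mp hi).1
  simp only [PySem.List.remove?, hi, Option.map_some, Option.getD_some]
  rw [List.length_eraseIdx]
  simp only [hilt, if_true]
  simp [List.length_cons]

-- the while loop of Source B: state = (pool, last_end, selected)
def pvExtract : List (String × Int × Int × Int) → Option Int →
    List (String × Int × Int × Int) → List (String × Int × Int × Int)
  | [], _, selected => selected
  | x :: pool, last_end, selected =>
    let best := (PySem.List.min2? (x :: pool) (fun r => r.2.1) (fun r => r.2.2.1)).getD x
    let pool' := (PySem.List.remove? (x :: pool) best).getD (x :: pool)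
    match last_end with
    | none => pvExtract pool' (some best.2.2.1) (selected ++ [best])
    | some e =>
      if best.2.1 ≥ e then pvExtract pool' (some best.2.2.1) (selected ++ [best])
      else pvExtract pool' (some e) selected
termination_by pool _ _ => pool.length
decreasing_by
  all_goals exact pv_pool_len x pool

def select_nonoverlapping_alt (regions : List (String × Int × Int × Int)) :
    List (String × Int × Int × Int) :=
  (["chr1", "chr10"]).foldl
    (fun selected chrom =>
      pvExtract (regions.filter (fun r => r.1 == chrom)) none selected) []

-- ===== PRECONDITION & SPEC =====
def Spec_select_nonoverlapping (regions : List (String × Int × Int × Int)) (out : List (String × Int × Int × Int)) : Prop := out = select_nonoverlapping_alt regions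
instance (regions : List (String × Int × Int × Int)) (out : List (String × Int × Int × Int)) : Decidable (Spec_select_nonoverlapping regions out) := by unfold Spec_select_nonoverlapping; infer_instance

-- ===== CLAIM (what is proved, stated in full; the proofs are below) =====
def Claim_equal_select_nonoverlapping : Prop := ∀ (regions : List (String × Int × Int × Int)), Dom_select_nonoverlapping regions → Spec_select_nonoverlapping regions (select_nonoverlapping regions)

-- ===== LEMMAS AND PROOFS =====

-- tagged comparison: pvBef refined by input position (makes the minimum unique)
def pvBefT (a b : (String × Int × Int × Int) × Nat) : Bool :=
  pvBef a.1 b.1 || (!pvBef b.1 a.1 && decide (a.2 < b.2))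

def pvMinStepT (acc : Option ((String × Int × Int × Int) × Nat))
    (x : (String × Int × Int × Int) × Nat) : Option ((String × Int × Int × Int) × Nat) :=
  match acc with
  | none => some x
  | some m => if pvBefT x m then some x else some m

-- order facts about pvBef / pvBefT
theorem pv_bef_irrefl (a : String × Int × Int × Int) : pvBef a a = false := by
  simp [pvBef]

theorem pv_befT_irrefl (a : (String × Int × Int × Int) × Nat) : pvBefT a a = false := by
  simp [pvBefT, pv_bef_irrefl]

theorem pv_befT_asym (a b : (String × Int × Int × Int) × Nat)
    (h : pvBefT a b = true) : pvBefT b a = false := by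
  simp only [pvBefT, pvBef] at *
  simp only [Bool.or_eq_true, Bool.and_eq_true, Bool.not_eq_true', decide_eq_true_iff,
    decide_eq_false_iff_not, Bool.or_eq_false_iff, Bool.and_eq_false_iff,
    Bool.not_eq_false'] at *
  omega

theorem pv_befT_trans (a b c : (String × Int × Int × Int) × Nat)
    (h1 : pvBefT a b = true) (h2 : pvBefT b c = true) : pvBefT a c = true := by
  simp only [pvBefT, pvBef] at *
  simp only [Bool.or_eq_true, Bool.and_eq_true, Bool.not_eq_true', decide_eq_true_iff,
    decide_eq_false_iff_not, Bool.or_eq_false_iff, Bool.and_eq_false_iff,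
    Bool.not_eq_false'] at *
  omega

theorem pv_befT_negtrans (a b c : (String × Int × Int × Int) × Nat)
    (h1 : pvBefT a b = false) (h2 : pvBefT b c = false) : pvBefT a c = false := by
  simp only [pvBefT, pvBef] at *
  simp only [Bool.or_eq_true, Bool.and_eq_true, Bool.not_eq_true', decide_eq_true_iff,
    decide_eq_false_iff_not, Bool.or_eq_false_iff, Bool.and_eq_false_iff,
    Bool.not_eq_false'] at *
  omega

-- both-ways-incomparable tagged elements have equal keys and equal tags
theorem pv_befT_tie (a b : (String × Int × Int × Int) × Nat)
    (h1 : pvBefT a b = false) (h2 : pvBefT b a = false) :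
    a.1.2.1 = b.1.2.1 ∧ a.1.2.2.1 = b.1.2.2.1 ∧ a.2 = b.2 := by
  simp only [pvBefT, pvBef, Bool.or_eq_false_iff, Bool.and_eq_false_iff, Bool.not_eq_true',
    decide_eq_false_iff_not, Bool.not_eq_false', decide_eq_true_iff, Bool.or_eq_true,
    Bool.and_eq_true] at *
  omega

-- generic insertion-sort facts (c is an arbitrary Bool comparison)
def pvIsort {α : Type} (c : α → α → Bool) (xs : List α) : List α :=
  xs.foldl (fun acc x => PySem.List.insertBy c x acc) []

theorem pv_insertBy_perm {α : Type} (c : α → α → Bool) (x : α) (l : List α) :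
    (PySem.List.insertBy c x l).Perm (x :: l) := by
  induction l with
  | nil => simp [PySem.List.insertBy]
  | cons y t ih =>
    by_cases h : c x y
    · simp [PySem.List.insertBy, h]
    · simp only [PySem.List.insertBy, h, Bool.false_eq_true, if_false]
      exact (ih.cons y).trans (List.Perm.swap x y t)

theorem pv_isort_perm {α : Type} (c : α → α → Bool) (xs : List α) :
    ∀ acc : List α, (xs.foldl (fun acc x => PySem.List.insertBy c x acc) acc).Perm (xs ++ acc) := by
  induction xs with
  | nil => intro acc; simp
  | cons x t ih =>
    intro acc
    simp only [List.foldl_cons, List.cons_append]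
    refine (ih _).trans ?_
    have h1 : (t ++ PySem.List.insertBy c x acc).Perm (t ++ x :: acc) :=
      List.Perm.append_left t (pv_insertBy_perm c x acc)
    exact h1.trans List.perm_middle

theorem pv_pairwise_insertBy {α : Type} (before : α → α → Bool)
    (hP2 : ∀ a b, before a b = true → before b a = false)
    (hP3 : ∀ a b c, before a b = true → before b c = true → before a c = true)
    (x : α) (ys : List α) (h : ys.Pairwise (fun a b => before b a = false)) :
    (PySem.List.insertBy before x ys).Pairwise (fun a b => before b a = false) := by
  induction ys with
  | nil => simp [PySem.List.insertBy]
  | cons y t ih =>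
    rcases List.pairwise_cons.mp h with ⟨hy, ht⟩
    by_cases hb : before x y = true
    · rw [show PySem.List.insertBy before x (y :: t) = x :: y :: t by
        simp [PySem.List.insertBy, hb]]
      refine List.pairwise_cons.mpr ⟨?_, h⟩
      intro w hw
      rcases List.mem_cons.mp hw with rfl | hw
      · exact hP2 _ _ hb
      · by_contra hc
        have hwx : before w x = true := by
          cases hwx : before w x with
          | true => rfl
          | false => exact absurd hwx hc
        have : before w y = true := hP3 _ _ _ hwx hb
        rw [hy w hw] at this; exact Bool.false_ne_true this
    · rw [show PySem.List.insertBy before x (y :: t) = y :: PySem.List.insertBy before x t by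
        simp [PySem.List.insertBy, hb]]
      refine List.pairwise_cons.mpr ⟨?_, ih ht⟩
      intro w hw
      rcases (PySem.List.mem_insertBy before x w t).mp hw with rfl | hw
      · simpa using hb
      · exact hy w hw

theorem pv_isort_pairwise {α : Type} (c : α → α → Bool)
    (hP2 : ∀ a b, c a b = true → c b a = false)
    (hP3 : ∀ a b d, c a b = true → c b d = true → c a d = true)
    (xs : List α) : (pvIsort c xs).Pairwise (fun a b => c b a = false) := by
  suffices h : ∀ acc : List α, acc.Pairwise (fun a b => c b a = false) →
      (xs.foldl (fun acc x => PySem.List.insertBy c x acc) acc).Pairwise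
        (fun a b => c b a = false) by
    exact h [] (by simp)
  induction xs with
  | nil => intro acc hacc; simpa using hacc
  | cons x t ih =>
    intro acc hacc
    simp only [List.foldl_cons]
    exact ih _ (pv_pairwise_insertBy c hP2 hP3 x acc hacc)

-- uniqueness of a sorted permutation (totality only assumed on the lists' elements)
theorem pv_sorted_unique {α : Type} (c : α → α → Bool) :
    ∀ (l₁ l₂ : List α), l₁.Perm l₂ →
      l₁.Pairwise (fun a b => c b a = false) → l₂.Pairwise (fun a b => c b a = false) →
      (∀ a ∈ l₁, ∀ b ∈ l₂, c a b = false → c b a = false → a = b) → l₁ = l₂ := by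
  intro l₁
  induction l₁ with
  | nil =>
    intro l₂ hp _ _ _
    exact (List.Perm.nil_eq hp).symm ▸ rfl
  | cons a t ih =>
    intro l₂ hp h1 h2 htot
    cases l₂ with
    | nil => exact absurd hp.symm (by simp)
    | cons b s =>
      have hab : a = b := by
        by_cases h : a = b
        · exact h
        · have ha2 : a ∈ b :: s := hp.mem_iff.mp (by simp)
          have has : a ∈ s := by
            rcases List.mem_cons.mp ha2 with h' | h'
            · exact absurd h' h
            · exact h'
          have hcab : c a b = false := (List.pairwise_cons.mp h2).1 a has
          have hb1 : b ∈ a :: t := hp.symm.mem_iff.mp (by simp)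
          have hbt : b ∈ t := by
            rcases List.mem_cons.mp hb1 with h' | h'
            · exact absurd h'.symm h
            · exact h'
          have hcba : c b a = false := (List.pairwise_cons.mp h1).1 b hbt
          exact htot a (by simp) b (by simp) hcab hcba
      subst hab
      have hts : t = s := by
        refine ih s (hp.cons_inv) (List.pairwise_cons.mp h1).2 (List.pairwise_cons.mp h2).2 ?_
        intro x hx y hy
        exact htot x (by simp [hx]) y (by simp [hy])
      rw [hts]

-- untagging: mapping fst commutes with tagged insertion when all existing tags are smaller
theorem pv_insertBy_untag (q : (String × Int × Int × Int) × Nat)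
    (acc : List ((String × Int × Int × Int) × Nat)) (h : ∀ p ∈ acc, p.2 < q.2) :
    (PySem.List.insertBy pvBefT q acc).map Prod.fst
      = PySem.List.insertBy pvBef q.1 (acc.map Prod.fst) := by
  induction acc with
  | nil => rfl
  | cons p t ih =>
    have hq : pvBefT q p = pvBef q.1 p.1 := by
      have hlt : ¬ (q.2 < p.2) := by have := h p (by simp); omega
      simp [pvBefT, hlt]
    by_cases hb : pvBef q.1 p.1 = true
    · rw [show PySem.List.insertBy pvBefT q (p :: t) = q :: p :: t by
        simp [PySem.List.insertBy, hq, hb]]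
      simp [PySem.List.insertBy, hb]
    · have hb' : pvBefT q p = false := by rw [hq]; simpa using hb
      rw [show PySem.List.insertBy pvBefT q (p :: t)
            = p :: PySem.List.insertBy pvBefT q t by simp [PySem.List.insertBy, hb']]
      have := ih (fun p hp => h p (by simp [hp]))
      simp only [List.map_cons, this]
      simp [PySem.List.insertBy, hb]

theorem pv_isort_untag_go :
    ∀ (T : List ((String × Int × Int × Int) × Nat)), T.Pairwise (fun p q => p.2 < q.2) →
    ∀ acc, (∀ p ∈ acc, ∀ q ∈ T, p.2 < q.2) →
      ((T.foldl (fun acc x => PySem.List.insertBy pvBefT x acc) acc).map Prod.fst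
        = (T.map Prod.fst).foldl (fun acc x => PySem.List.insertBy pvBef x acc)
            (acc.map Prod.fst)) := by
  intro T
  induction T with
  | nil => intro _ acc _; simp
  | cons q T' ih =>
    intro hinc acc hacc
    simp only [List.foldl_cons, List.map_cons]
    have h1 : ∀ p ∈ acc, p.2 < q.2 := fun p hp => hacc p hp q (by simp)
    rw [← pv_insertBy_untag q acc h1]
    refine ih (List.pairwise_cons.mp hinc).2 _ ?_
    intro p hp r hr
    rcases (PySem.List.mem_insertBy pvBefT q p acc).mp hp with rfl | hp'
    · exact (List.pairwise_cons.mp hinc).1 r hr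
    · exact hacc p hp' r (by simp [hr])

theorem pv_isort_untag (T : List ((String × Int × Int × Int) × Nat))
    (hinc : T.Pairwise (fun p q => p.2 < q.2)) :
    (pvIsort pvBefT T).map Prod.fst = pvIsort pvBef (T.map Prod.fst) := by
  simpa using pv_isort_untag_go T hinc [] (by simp)

-- min fold: result is a minimum of everything scanned
theorem pv_minT_spec :
    ∀ (T : List ((String × Int × Int × Int) × Nat)) (q : (String × Int × Int × Int) × Nat),
    ∃ m', T.foldl pvMinStepT (some q) = some m' ∧ (m' = q ∨ m' ∈ T) ∧
      pvBefT q m' = false ∧ ∀ z ∈ T, pvBefT z m' = false := by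
  intro T
  induction T with
  | nil => intro q; exact ⟨q, rfl, Or.inl rfl, pv_befT_irrefl q, by simp⟩
  | cons z T' ih =>
    intro q
    simp only [List.foldl_cons]
    by_cases h : pvBefT z q
    · obtain ⟨m', hm', hmem, hqm, hall⟩ := ih z
      refine ⟨m', by simpa [pvMinStepT, h] using hm', ?_, ?_, ?_⟩
      · rcases hmem with rfl | hmem'
        · exact Or.inr (by simp)
        · exact Or.inr (by simp [hmem'])
      · cases hqmf : pvBefT q m' with
        | false => rfl
        | true =>
          have : pvBefT z m' = true := pv_befT_trans z q m' h hqmf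
          rw [hqm] at this; exact absurd this (by simp)
      · intro w hw
        rcases List.mem_cons.mp hw with rfl | hw'
        · exact hqm
        · exact hall w hw'
    · obtain ⟨m', hm', hmem, hqm, hall⟩ := ih q
      have hz : pvBefT z q = false := by simpa using h
      refine ⟨m', by simpa [pvMinStepT, h] using hm', ?_, hqm, ?_⟩
      · rcases hmem with rfl | hmem'
        · exact Or.inl rfl
        · exact Or.inr (by simp [hmem'])
      · intro w hw
        rcases List.mem_cons.mp hw with rfl | hw'
        · exact pv_befT_negtrans w q m' hz hqm
        · exact hall w hw'

-- untagging the min fold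
theorem pv_min_untag :
    ∀ (T : List ((String × Int × Int × Int) × Nat)) (q : (String × Int × Int × Int) × Nat),
    T.Pairwise (fun p r => p.2 < r.2) → (∀ z ∈ T, q.2 < z.2) →
    Option.map Prod.fst (T.foldl pvMinStepT (some q))
      = (T.map Prod.fst).foldl pvMinStep (some q.1) := by
  intro T
  induction T with
  | nil => intro q _ _; rfl
  | cons z T' ih =>
    intro q hinc hq
    have hzq : ¬ (z.2 < q.2) := by have := hq z (by simp); omega
    have hcond : pvBefT z q = pvBef z.1 q.1 := by simp [pvBefT, hzq]
    simp only [List.foldl_cons, List.map_cons]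
    by_cases h : pvBef z.1 q.1
    · have hstep : pvMinStepT (some q) z = some z := by simp [pvMinStepT, hcond, h]
      have hstep' : pvMinStep (some q.1) z.1 = some z.1 := by simp [pvMinStep, h]
      rw [hstep, hstep']
      exact ih z (List.pairwise_cons.mp hinc).2 (List.pairwise_cons.mp hinc).1
    · have hstep : pvMinStepT (some q) z = some q := by simp [pvMinStepT, hcond, h]
      have hstep' : pvMinStep (some q.1) z.1 = some q.1 := by simp [pvMinStep, h]
      rw [hstep, hstep']
      exact ih q (List.pairwise_cons.mp hinc).2 (fun w hw => hq w (by simp [hw]))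

theorem pv_zipIdx_pairwise {α : Type} (l : List α) (k : Nat) :
    (l.zipIdx k).Pairwise (fun p q => p.2 < q.2) := by
  rw [List.pairwise_iff_getElem]
  intro i j hi hj hij
  rw [List.length_zipIdx] at hi hj
  simp [List.getElem_zipIdx, hij]

-- membership in zipIdx gives the positional reading
theorem pv_mem_zip (P : List (String × Int × Int × Int))
    (p : (String × Int × Int × Int) × Nat) (h : p ∈ P.zipIdx) :
    ∃ _ : p.2 < P.length, p.1 = P[p.2] := by
  obtain ⟨a, i⟩ := p
  have := List.mem_zipIdx h
  simp only [Nat.zero_le, Nat.sub_zero, zero_add, true_and] at this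
  exact ⟨this.1, by simpa using this.2⟩

theorem pv_sorted2_eq_isort (xs : List (String × Int × Int × Int)) :
    PySem.List.sorted2 xs (fun r => r.2.1) (fun r => r.2.2.1) = pvIsort pvBef xs := rfl

-- the heart: extracting the first minimum un-conses the stable sort
theorem pv_min_cons_sorted2 (P : List (String × Int × Int × Int))
    (m : String × Int × Int × Int)
    (h : PySem.List.min2? P (fun r => r.2.1) (fun r => r.2.2.1) = some m) :
    m ∈ P ∧ PySem.List.sorted2 P (fun r => r.2.1) (fun r => r.2.2.1)
      = m :: PySem.List.sorted2 (P.erase m) (fun r => r.2.1) (fun r => r.2.2.1) := by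
  cases P with
  | nil => rw [pv_min2?_eq_fold] at h; simp at h
  | cons x t =>
    rw [pv_min2?_eq_fold] at h
    have hfold : (x :: t).foldl pvMinStep none = t.foldl pvMinStep (some x) := rfl
    rw [hfold] at h
    -- the tagged minimum m'
    obtain ⟨m', hm', hmem', hqm', hall'⟩ := pv_minT_spec (t.zipIdx 1) (x, 0)
    have hTc : (x :: t).zipIdx = (x, 0) :: t.zipIdx 1 := List.zipIdx_cons
    have hmemT : m' ∈ (x :: t).zipIdx := by
      rw [hTc]
      rcases hmem' with rfl | h'
      · simp
      · simp [h']
    have hminT : ∀ z ∈ (x :: t).zipIdx, pvBefT z m' = false := by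
      rw [hTc]
      intro z hz
      rcases List.mem_cons.mp hz with rfl | hz'
      · exact hqm'
      · exact hall' z hz'
    -- untag the minimum: m'.1 = m
    have hq1 : ∀ z ∈ t.zipIdx 1, ((x, 0) : (String × Int × Int × Int) × Nat).2 < z.2 := by
      intro z hz
      obtain ⟨z1, z2⟩ := z
      have := List.mem_zipIdx hz
      simpa using this.1
    have humin := pv_min_untag (t.zipIdx 1) (x, 0) (pv_zipIdx_pairwise t 1) hq1
    rw [hm', List.zipIdx_map_fst, h] at humin
    have hm1 : m'.1 = m := by simpa using humin
    -- positional facts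
    obtain ⟨hilt, hPi⟩ := pv_mem_zip (x :: t) m' hmemT
    have hmmem : m ∈ x :: t := by rw [← hm1, hPi]; exact List.getElem_mem hilt
    -- elements strictly before position m'.2 are strictly after m in the order
    have hearly : ∀ j (hj : j < m'.2), pvBef m ((x :: t)[j]'(lt_trans hj hilt)) = true := by
      intro j hj
      have hjlt : j < (x :: t).length := lt_trans hj hilt
      have hmemj : (((x :: t)[j]'hjlt, j) : (String × Int × Int × Int) × Nat)
          ∈ (x :: t).zipIdx := by
        refine List.mem_iff_getElem.mpr ⟨j, by simpa [List.length_zipIdx] using hjlt, ?_⟩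
        rw [List.getElem_zipIdx]
        simp
      have hz := hminT _ hmemj
      simp only [pvBefT, hm1, Bool.or_eq_false_iff, Bool.and_eq_false_iff,
        Bool.not_eq_false', decide_eq_false_iff_not] at hz
      rcases hz.2 with h2 | h2
      · exact h2
      · exact absurd hj (by simpa using h2)
    -- idxOf? characterisations
    have hidxP : List.idxOf? m (x :: t) = some m'.2 := by
      refine List.idxOf?_eq_some_iff.mpr ⟨hilt, by rw [← hPi, hm1], ?_⟩
      intro j hj heq
      have := hearly j hj
      rw [heq] at this
      exact absurd this (by simp [pv_bef_irrefl])
    have hidxT : List.idxOf? m' ((x :: t).zipIdx) = some m'.2 := by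
      refine List.idxOf?_eq_some_iff.mpr ⟨by simpa [List.length_zipIdx] using hilt, ?_, ?_⟩
      · have h2 : ((x :: t).zipIdx)[m'.2]'(by simpa [List.length_zipIdx] using hilt)
            = ((x :: t)[m'.2]'hilt, m'.2) := by
          rw [List.getElem_zipIdx]
          simp
        rw [h2, ← hPi]
      · intro j hj heq
        have h2 : ((x :: t).zipIdx)[j]'(by simpa [List.length_zipIdx] using lt_trans hj hilt)
            = ((x :: t)[j]'(lt_trans hj hilt), j) := by
          rw [List.getElem_zipIdx]
          simp
        rw [h2] at heq
        have := congrArg Prod.snd heq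
        simp at this
        omega
    have heraseP : (x :: t).erase m = (x :: t).eraseIdx m'.2 := by
      rw [List.erase_eq_eraseIdx, hidxP]
    have heraseT : ((x :: t).zipIdx).erase m' = ((x :: t).zipIdx).eraseIdx m'.2 := by
      rw [List.erase_eq_eraseIdx, hidxT]
    -- the sorted tagged list un-conses at m'
    have hPW : ((x :: t).zipIdx).Pairwise (fun p q => p.2 < q.2) := pv_zipIdx_pairwise (x :: t) 0
    have hperm1 : (pvIsort pvBefT ((x :: t).zipIdx)).Perm ((x :: t).zipIdx) := by
      have := pv_isort_perm pvBefT ((x :: t).zipIdx) []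
      simpa [pvIsort] using this
    have hperm2 : (pvIsort pvBefT (((x :: t).zipIdx).erase m')).Perm
        (((x :: t).zipIdx).erase m') := by
      have := pv_isort_perm pvBefT (((x :: t).zipIdx).erase m') []
      simpa [pvIsort] using this
    have hkey : pvIsort pvBefT ((x :: t).zipIdx)
        = m' :: pvIsort pvBefT (((x :: t).zipIdx).erase m') := by
      refine pv_sorted_unique pvBefT _ _ ?_ ?_ ?_ ?_
      · exact hperm1.trans ((List.perm_cons_erase hmemT).trans (hperm2.symm.cons m'))
      · exact pv_isort_pairwise pvBefT pv_befT_asym pv_befT_trans _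
      · refine List.pairwise_cons.mpr ⟨?_, pv_isort_pairwise pvBefT pv_befT_asym pv_befT_trans _⟩
        intro z hz
        exact hminT z (List.mem_of_mem_erase (hperm2.mem_iff.mp hz))
      · intro a ha b hb hab hba
        have haT : a ∈ (x :: t).zipIdx := hperm1.mem_iff.mp ha
        have hbT : b ∈ (x :: t).zipIdx := by
          rcases List.mem_cons.mp hb with rfl | hb'
          · exact hmemT
          · exact List.mem_of_mem_erase (hperm2.mem_iff.mp hb')
        obtain ⟨_, _, hidx⟩ := pv_befT_tie a b hab hba
        obtain ⟨hla, hge_a⟩ := pv_mem_zip _ a haT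
        obtain ⟨hlb, hge_b⟩ := pv_mem_zip _ b hbT
        have hfst : a.1 = b.1 := by
          rw [hge_a, hge_b]
          congr 1
        exact Prod.ext hfst hidx
    -- untag the whole chain
    have hU1 : (pvIsort pvBefT ((x :: t).zipIdx)).map Prod.fst = pvIsort pvBef (x :: t) := by
      rw [pv_isort_untag _ hPW, List.zipIdx_map_fst]
    have hUE : (pvIsort pvBefT (((x :: t).zipIdx).erase m')).map Prod.fst
        = pvIsort pvBef ((x :: t).erase m) := by
      rw [pv_isort_untag _ (hPW.sublist (List.erase_sublist)), heraseT,
        ← List.eraseIdx_map, List.zipIdx_map_fst, ← heraseP]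
    refine ⟨hmmem, ?_⟩
    rw [pv_sorted2_eq_isort, pv_sorted2_eq_isort, ← hU1, hkey]
    simp only [List.map_cons, hm1, hUE]

-- pulling the accumulated 'selected' out of the greedy fold (port A's inner loop)
theorem pv_greedy_step_acc (s : List (String × Int × Int × Int)) (le : Option Int)
    (x : String × Int × Int × Int) :
    pvGreedyStep (s, le) x = (s ++ (pvGreedyStep ([], le) x).1, (pvGreedyStep ([], le) x).2) := by
  cases le with
  | none => simp [pvGreedyStep]
  | some e => by_cases h : x.2.1 ≥ e <;> simp [pvGreedyStep, h]

theorem pv_greedy_acc (xs : List (String × Int × Int × Int)) :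
    ∀ (s : List (String × Int × Int × Int)) (le : Option Int),
    xs.foldl pvGreedyStep (s, le)
      = (s ++ (xs.foldl pvGreedyStep ([], le)).1, (xs.foldl pvGreedyStep ([], le)).2) := by
  induction xs with
  | nil => intro s le; simp
  | cons x xs ih =>
    intro s le
    simp only [List.foldl_cons]
    rw [pv_greedy_step_acc s le x, ih]
    conv_rhs => rw [ih (pvGreedyStep ([], le) x).1 (pvGreedyStep ([], le) x).2]
    simp

-- the selection loop computes the greedy scan of the stable sort
theorem pv_extract_eq :
    ∀ (n : Nat) (P : List (String × Int × Int × Int)) (le : Option Int)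
      (acc : List (String × Int × Int × Int)), P.length ≤ n →
    pvExtract P le acc
      = acc ++ ((PySem.List.sorted2 P (fun r => r.2.1) (fun r => r.2.2.1)).foldl
          pvGreedyStep ([], le)).1 := by
  intro n
  induction n with
  | zero =>
    intro P le acc h
    have hP : P = [] := by
      cases P with
      | nil => rfl
      | cons a b => simp at h
    subst hP
    cases le <;> simp [pvExtract, pv_sorted2_eq_isort, pvIsort]
  | succ n ih =>
    intro P le acc h
    cases P with
    | nil => cases le <;> simp [pvExtract, pv_sorted2_eq_isort, pvIsort]
    | cons x t =>
      have hfold : PySem.List.min2? (x :: t) (fun r => r.2.1) (fun r => r.2.2.1)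
          = t.foldl pvMinStep (some x) := by
        rw [pv_min2?_eq_fold]; rfl
      obtain ⟨m, hm, hmem⟩ := pv_minfold_mem t x
      have hmin : PySem.List.min2? (x :: t) (fun r => r.2.1) (fun r => r.2.2.1) = some m := by
        rw [hfold, hm]
      obtain ⟨hmemP, hsort⟩ := pv_min_cons_sorted2 (x :: t) m hmin
      have hbest : (PySem.List.min2? (x :: t) (fun r => r.2.1) (fun r => r.2.2.1)).getD x
          = m := by rw [hmin]; rfl
      obtain ⟨i, hi⟩ := Option.isSome_iff_exists.mp (List.isSome_idxOf?.mpr hmemP)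
      have hpool : (PySem.List.remove? (x :: t) m).getD (x :: t) = (x :: t).erase m := by
        simp only [PySem.List.remove?, hi, Option.map_some, Option.getD_some]
        rw [List.erase_eq_eraseIdx, hi]
      have hlen : ((x :: t).erase m).length ≤ n := by
        rw [List.length_erase_of_mem hmemP]
        simp only [List.length_cons] at h ⊢
        omega
      rw [hsort]
      cases le with
      | none =>
        have hunf : pvExtract (x :: t) none acc
            = pvExtract ((x :: t).erase m) (some m.2.2.1) (acc ++ [m]) := by
          rw [pvExtract]
          simp only [hbest, hpool]
        rw [hunf, ih _ _ _ hlen]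
        have hstep : pvGreedyStep ([], none) m = ([m], some m.2.2.1) := rfl
        simp only [List.foldl_cons, hstep]
        conv_rhs => rw [pv_greedy_acc]
        simp
      | some e =>
        by_cases hge : m.2.1 ≥ e
        · have hunf : pvExtract (x :: t) (some e) acc
              = pvExtract ((x :: t).erase m) (some m.2.2.1) (acc ++ [m]) := by
            rw [pvExtract]
            simp only [hbest, hpool, hge, if_true]
          rw [hunf, ih _ _ _ hlen]
          have hstep : pvGreedyStep ([], some e) m = ([m], some m.2.2.1) := by
            simp [pvGreedyStep, hge]
          simp only [List.foldl_cons, hstep]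
          conv_rhs => rw [pv_greedy_acc]
          simp
        · have hunf : pvExtract (x :: t) (some e) acc
              = pvExtract ((x :: t).erase m) (some e) acc := by
            rw [pvExtract]
            simp only [hbest, hpool, hge, if_false]
          rw [hunf, ih _ _ _ hlen]
          have hstep : pvGreedyStep ([], some e) m = ([], some e) := by
            simp [pvGreedyStep, hge]
          simp only [List.foldl_cons, hstep]

-- A's dict-bucketing loop is two filters
theorem pv_dict_fold (regions : List (String × Int × Int × Int))
    (a b : List (String × Int × Int × Int)) :
    regions.foldl
      (fun d r => if d.contains r.1 then d.modify r.1 [] (fun l => l ++ [r]) else d)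
      (PySem.Dict.mk [("chr1", a), ("chr10", b)])
    = PySem.Dict.mk [("chr1", a ++ regions.filter (fun r => r.1 == "chr1")),
                     ("chr10", b ++ regions.filter (fun r => r.1 == "chr10"))] := by
  induction regions generalizing a b with
  | nil => simp
  | cons r rs ih =>
    simp only [List.foldl_cons, List.filter_cons]
    by_cases h1 : r.1 = "chr1"
    · have : (PySem.Dict.mk [("chr1", a), ("chr10", b)]).contains r.1 = true := by
        simp [PySem.Dict.contains, h1]
      rw [if_pos this]
      have hm : (PySem.Dict.mk [("chr1", a), ("chr10", b)]).modify r.1 [] (fun l => l ++ [r])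
          = PySem.Dict.mk [("chr1", a ++ [r]), ("chr10", b)] := by
        simp [PySem.Dict.modify, PySem.Dict.getD, PySem.Dict.get?, PySem.Dict.insert,
          PySem.Dict.contains, h1]
      rw [hm, ih]
      simp [h1]
    · by_cases h10 : r.1 = "chr10"
      · have : (PySem.Dict.mk [("chr1", a), ("chr10", b)]).contains r.1 = true := by
          simp [PySem.Dict.contains, h10]
        rw [if_pos this]
        have hm : (PySem.Dict.mk [("chr1", a), ("chr10", b)]).modify r.1 [] (fun l => l ++ [r])
            = PySem.Dict.mk [("chr1", a), ("chr10", b ++ [r])] := by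
          simp [PySem.Dict.modify, PySem.Dict.getD, PySem.Dict.get?, PySem.Dict.insert,
            PySem.Dict.contains, h10]
        rw [hm, ih]
        simp [h10]
      · have : (PySem.Dict.mk [("chr1", a), ("chr10", b)]).contains r.1 = false := by
          simp [PySem.Dict.contains]
          exact ⟨fun h => h1 h.symm, fun h => h10 h.symm⟩
        rw [this]
        simp only [Bool.false_eq_true, if_false]
        rw [ih]
        simp [h1, h10]

-- ===== VERDICT (by name: the statement is the Claim_ definition above) =====
theorem select_nonoverlapping_spec : Claim_equal_select_nonoverlapping := by
  intro regions _
  unfold Spec_select_nonoverlapping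
  have hAeq : select_nonoverlapping regions
      = ((PySem.List.sorted2 (regions.filter (fun r => r.1 == "chr1"))
            (fun x => x.2.1) (fun x => x.2.2.1)).foldl pvGreedyStep ([], none)).1
        ++ ((PySem.List.sorted2 (regions.filter (fun r => r.1 == "chr10"))
            (fun x => x.2.1) (fun x => x.2.2.1)).foldl pvGreedyStep ([], none)).1 := by
    show (["chr1", "chr10"]).foldl
        (fun sel chrom =>
          let cur := PySem.List.sorted2
            ((regions.foldl
                (fun d r => if d.contains r.1 then d.modify r.1 [] (fun l => l ++ [r]) else d)
                ((PySem.Dict.empty.insert "chr1" []).insert "chr10" [])).getD chrom [])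
            (fun x => x.2.1) (fun x => x.2.2.1)
          (cur.foldl pvGreedyStep (sel, none)).1) [] = _
    have hD0 : (PySem.Dict.empty.insert "chr1"
          ([] : List (String × Int × Int × Int))).insert "chr10" []
        = PySem.Dict.mk [("chr1", []), ("chr10", [])] := rfl
    rw [hD0, pv_dict_fold regions [] []]
    have hg1 : (PySem.Dict.mk [("chr1", [] ++ regions.filter (fun r => r.1 == "chr1")),
          ("chr10", [] ++ regions.filter (fun r => r.1 == "chr10"))]).getD "chr1" [] =
          regions.filter (fun r => r.1 == "chr1") := by
      simp [PySem.Dict.getD, PySem.Dict.get?]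
    have hg10 : (PySem.Dict.mk [("chr1", [] ++ regions.filter (fun r => r.1 == "chr1")),
          ("chr10", [] ++ regions.filter (fun r => r.1 == "chr10"))]).getD "chr10" [] =
          regions.filter (fun r => r.1 == "chr10") := by
      simp [PySem.Dict.getD, PySem.Dict.get?]
    simp only [List.foldl_cons, List.foldl_nil, hg1, hg10]
    rw [pv_greedy_acc]
  rw [hAeq]
  show _ = (["chr1", "chr10"]).foldl
      (fun selected chrom =>
        pvExtract (regions.filter (fun r => r.1 == chrom)) none selected) []
  simp only [List.foldl_cons, List.foldl_nil]
  rw [pv_extract_eq (regions.filter (fun r => r.1 == "chr1")).length _ none [] le_rfl]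
  rw [pv_extract_eq (regions.filter (fun r => r.1 == "chr10")).length _ none _ le_rfl]
  simp
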